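-- pv_equiv track=rewrite | github.com/jmgamboa/codequizzes | intermediate/switches/second_solution.py | switch_lights
-- ===== SOURCE A (Python) =====
-- def lights_array(num):
--     arr = []
--     light = 0 # off light
--     count = 0
--     while count < num:
--         arr.append(light) #add off lights to empty array
--         count += 1
--     return arr #return array of lights off - 0 is off
--
-- def switch_lights(num):
--     arr = lights_array(num) #get array of light starting off
--     count = 1
--     while count <= num: #start swicthing a every pass until the limit num
--         for index, value in enumerate(arr):
--             if (index + 1) % count == 0: #if index is divisible by count(pass #)
--                 if value == 0:
--                     arr[index] = 1 #turn light on
--                 else: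
--                     arr[index] = 0 #turn light off
--
--         count += 1
--
--     return arr #return arrays of lights switched
-- ===== SOURCE B (Python) =====
-- def switch_lights(num):
--     n = max(num, 0)
--     arr = [0] * n
--     k = 1
--     while k * k <= n:
--         arr[k * k - 1] = 1
--         k += 1
--     return arr
-- ===== Notes on version B (the rewrite author's own statement) =====
-- stated objective: faster
-- what changed: Replaces the num passes of toggling every count-th light (quadratic) by directly marking the perfect-square positions k*k-1 for k*k <= num in a single O(sqrt(num)) marking loop over a preallocated zero array.
import Mathlib
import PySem

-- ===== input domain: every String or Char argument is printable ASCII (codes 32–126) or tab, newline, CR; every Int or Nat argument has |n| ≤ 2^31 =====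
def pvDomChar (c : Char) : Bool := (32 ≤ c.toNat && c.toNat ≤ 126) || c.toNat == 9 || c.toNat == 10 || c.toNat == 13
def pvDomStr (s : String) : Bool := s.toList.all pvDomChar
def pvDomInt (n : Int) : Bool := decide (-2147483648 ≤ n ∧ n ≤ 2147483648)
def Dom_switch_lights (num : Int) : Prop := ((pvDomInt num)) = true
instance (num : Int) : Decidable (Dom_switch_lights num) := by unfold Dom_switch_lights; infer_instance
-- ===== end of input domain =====

-- B replaces A's num quadratic toggle passes by directly marking the perfect-square
-- positions k*k-1 (k*k ≤ num) in a zero array: an asymptotically faster algorithm.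

-- ===== PORT A =====
-- while count < num: arr.append(0); count += 1
def lightsLoop (num count : Int) (arr : List Int) : List Int :=
  if count < num then lightsLoop num (count + 1) (arr ++ [0]) else arr
termination_by (num - count).toNat
decreasing_by omega

def lights_array (num : Int) : List Int := lightsLoop num 0 []

-- one pass 'for index, value in enumerate(arr): …' (each write arr[index] only affects
-- the entry already read at this position, so the pass is the map over enumerate(arr))
def passOnce (count : Int) (arr : List Int) : List Int :=
  (PySem.List.enumerate arr).map (fun iv =>
    if PySem.Int.mod (iv.1 + 1) count = 0 then (if iv.2 = 0 then (1 : Int) else 0) else iv.2)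

-- while count <= num: <pass>; count += 1
def switchLoop (num count : Int) (arr : List Int) : List Int :=
  if count ≤ num then switchLoop num (count + 1) (passOnce count arr) else arr
termination_by (num + 1 - count).toNat
decreasing_by omega

def switch_lights (num : Int) : List Int := switchLoop num 1 (lights_array num)

-- ===== PORT B =====
-- termination helper for markLoop, cited by name in its decreasing_by
theorem pv_le_mul_self (k : Int) : k ≤ k * k := by
  by_cases h0 : k ≤ 0
  · exact le_trans h0 (mul_self_nonneg k)
  · calc k = k * 1 := (mul_one k).symm
    _ ≤ k * k := mul_le_mul_of_nonneg_left (by omega) (by omega)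

-- while k*k <= n: arr[k*k-1] = 1; k += 1
def markLoop (n k : Int) (arr : List Int) : List Int :=
  if k * k ≤ n then markLoop n (k + 1) (arr.set (k * k - 1).toNat 1) else arr
termination_by (n + 1 - k).toNat
decreasing_by
  rename_i h
  have hk := pv_le_mul_self k
  omega

def switch_lights_alt (num : Int) : List Int :=
  markLoop (max num 0) 1 (List.replicate (max num 0).toNat 0)

-- ===== PRECONDITION & SPEC =====
def Spec_switch_lights (num : Int) (out : List Int) : Prop := out = switch_lights_alt num
instance (num : Int) (out : List Int) : Decidable (Spec_switch_lights num out) := by unfold Spec_switch_lights; infer_instance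

-- ===== CLAIM (what is proved, stated in full; the proofs are below) =====
def Claim_equal_switch_lights : Prop := ∀ (num : Int), Dom_switch_lights num → Spec_switch_lights num (switch_lights num)

-- ===== LEMMAS AND PROOFS =====

-- toggle of a 0/1 light
def tog (v : Int) : Int := if v = 0 then 1 else 0

-- number of divisors of t in the integer interval [c, num]
noncomputable def Dcnt (c num t : Int) : ℕ := ((Finset.Icc c num).filter (fun d => d ∣ t)).card

theorem lightsLoop_eq (num : Int) : ∀ (count : Int) (arr : List Int),
    lightsLoop num count arr = arr ++ List.replicate (num - count).toNat 0 := by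
  intro count arr
  rw [lightsLoop]
  split
  · rename_i h
    rw [lightsLoop_eq num (count + 1) (arr ++ [0])]
    have : (num - count).toNat = (num - (count + 1)).toNat + 1 := by omega
    rw [this]
    simp [List.append_assoc, List.replicate_succ]
  · rename_i h
    have : (num - count).toNat = 0 := by omega
    simp [this]
termination_by count => (num - count).toNat
decreasing_by omega

theorem passOnce_getElem? (c : Int) (arr : List Int) (i : ℕ) :
    (passOnce c arr)[i]? = arr[i]?.map
      (fun v => if PySem.Int.mod ((i : Int) + 1) c = 0 then tog v else v) := by
  simp only [passOnce, List.getElem?_map, PySem.List.getElem?_enumerate, Option.map_map]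
  cases arr[i]? <;> simp [tog]

theorem passOnce_mem01 (c : Int) (arr : List Int)
    (h : ∀ v ∈ arr, v = 0 ∨ v = 1) : ∀ w ∈ passOnce c arr, w = 0 ∨ w = 1 := by
  intro w hw
  simp only [passOnce, List.mem_map] at hw
  obtain ⟨iv, hiv, rfl⟩ := hw
  have hv : iv.2 ∈ arr := by
    rw [PySem.List.mem_enumerate_iff] at hiv
    obtain ⟨k, hk, rfl⟩ := hiv
    exact List.getElem_mem _
  split
  · split <;> simp
  · exact h _ hv

theorem passOnce_length (c : Int) (arr : List Int) :
    (passOnce c arr).length = arr.length := by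
  simp [passOnce, PySem.List.length_enumerate]

theorem Dcnt_step (c num t : Int) (h : c ≤ num) :
    Dcnt c num t = (if c ∣ t then 1 else 0) + Dcnt (c + 1) num t := by
  classical
  have hins : Finset.Icc c num = insert c (Finset.Icc (c + 1) num) := by
    ext x
    simp only [Finset.mem_Icc, Finset.mem_insert]
    omega
  have hnot : c ∉ Finset.Icc (c + 1) num := by
    simp only [Finset.mem_Icc]
    omega
  unfold Dcnt
  rw [hins, Finset.filter_insert]
  split
  · rename_i hdvd
    rw [Finset.card_insert_of_notMem (fun hmem => hnot (Finset.mem_of_mem_filter _ hmem))]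
    omega
  · omega

theorem switchLoop_getElem? (num : Int) : ∀ (c : Int), 1 ≤ c → ∀ (arr : List Int),
    (∀ v ∈ arr, v = 0 ∨ v = 1) → ∀ (i : ℕ),
    (switchLoop num c arr)[i]? = arr[i]?.map
      (fun v => if Even (Dcnt c num ((i : Int) + 1)) then v else tog v) := by
  intro c hc arr harr i
  rw [switchLoop]
  split
  · rename_i h
    rw [switchLoop_getElem? num (c + 1) (by omega) (passOnce c arr)
        (passOnce_mem01 c arr harr) i]
    rw [passOnce_getElem?, Option.map_map]
    cases hel : arr[i]? with
    | none => rfl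
    | some v =>
      have hv : v = 0 ∨ v = 1 := harr v (List.mem_of_getElem? hel)
      simp only [Option.map_some, Function.comp]
      congr 1
      have hstep := Dcnt_step c num ((i : Int) + 1) h
      by_cases hd : c ∣ ((i : Int) + 1)
      · have hmod : PySem.Int.mod ((i : Int) + 1) c = 0 :=
          (PySem.Int.mod_eq_zero_iff_dvd _ _).mpr hd
        rw [hmod, if_pos rfl, hstep, if_pos hd]
        have hpar : Even (1 + Dcnt (c + 1) num ((i : Int) + 1)) ↔
            ¬ Even (Dcnt (c + 1) num ((i : Int) + 1)) := by
          rw [Nat.add_comm, Nat.even_add_one]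
        by_cases he : Even (Dcnt (c + 1) num ((i : Int) + 1))
        · rw [if_pos he, if_neg (by simp [hpar, he])]
        · rw [if_neg he, if_pos (hpar.mpr he)]
          rcases hv with rfl | rfl <;> simp [tog]
      · have hmod : PySem.Int.mod ((i : Int) + 1) c ≠ 0 := by
          intro h0
          exact hd ((PySem.Int.mod_eq_zero_iff_dvd _ _).mp h0)
        rw [if_neg hmod, hstep, if_neg hd]
        simp
  · rename_i h
    have hD : Dcnt c num ((i : Int) + 1) = 0 := by
      unfold Dcnt
      have : Finset.Icc c num = ∅ := Finset.Icc_eq_empty (by omega)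
      simp [this]
    rw [hD]
    simp
termination_by c => (num + 1 - c).toNat
decreasing_by omega

theorem markLoop_getElem? (n : Int) : ∀ (k : Int), 1 ≤ k → ∀ (arr : List Int),
    n ≤ (arr.length : Int) → ∀ (i : ℕ), (i : Int) < n →
    (markLoop n k arr)[i]? =
      if ∃ j ∈ Finset.Icc k n, j * j = (i : Int) + 1 then some 1 else arr[i]? := by
  intro k hk arr hlen i hi
  rw [markLoop]
  split
  · rename_i h
    have hk2 : k ≤ k * k := by nlinarith
    rw [markLoop_getElem? n (k + 1) (by omega) _
        (by rw [List.length_set]; exact hlen) i hi]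
    by_cases hrest : ∃ j ∈ Finset.Icc (k + 1) n, j * j = (i : Int) + 1
    · rw [if_pos hrest, if_pos ?_]
      obtain ⟨j, hj, hjj⟩ := hrest
      have hj' := Finset.mem_Icc.mp hj
      exact ⟨j, Finset.mem_Icc.mpr ⟨by omega, hj'.2⟩, hjj⟩
    · rw [if_neg hrest]
      by_cases hkk : k * k = (i : Int) + 1
      · have hidx : ((k * k - 1).toNat) = i := by omega
        rw [if_pos ⟨k, Finset.mem_Icc.mpr ⟨le_refl k, by omega⟩, hkk⟩]
        rw [hidx, List.getElem?_set_self (by omega)]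
      · rw [if_neg ?_]
        · have h1 : (1 : ℤ) ≤ k * k := by nlinarith
          have hne : (k * k - 1).toNat ≠ i := by
            intro hq
            apply hkk
            rw [← hq, Int.toNat_of_nonneg (by omega)]
            ring
          rw [List.getElem?_set_ne hne]
        · rintro ⟨j, hj, hjj⟩
          have hj' := Finset.mem_Icc.mp hj
          rcases eq_or_lt_of_le hj'.1 with rfl | hlt
          · exact hkk hjj
          · exact hrest ⟨j, Finset.mem_Icc.mpr ⟨by omega, hj'.2⟩, hjj⟩
  · rename_i h
    rw [if_neg]
    rintro ⟨j, hj, hjj⟩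
    have hj' := Finset.mem_Icc.mp hj
    nlinarith [hj'.1, hj'.2]
termination_by k => (n + 1 - k).toNat
decreasing_by
  rename_i h
  have hk2 : k ≤ k * k := by nlinarith
  omega

theorem markLoop_length (n : Int) : ∀ (k : Int) (arr : List Int),
    (markLoop n k arr).length = arr.length := by
  intro k arr
  rw [markLoop]
  split
  · rename_i h
    rw [markLoop_length n (k + 1)]
    simp
  · rfl
termination_by k arr => (n + 1 - k).toNat
decreasing_by
  rename_i h
  have hk : k ≤ k * k := by
    by_cases h0 : k ≤ 0
    · exact le_trans h0 (mul_self_nonneg k)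
    · nlinarith [h0]
  omega

theorem switchLoop_length (num : Int) : ∀ (c : Int) (arr : List Int),
    (switchLoop num c arr).length = arr.length := by
  intro c arr
  rw [switchLoop]
  split
  · rw [switchLoop_length num (c + 1), passOnce_length]
  · rfl
termination_by c => (num + 1 - c).toNat
decreasing_by omega

-- parity of the divisor count: odd iff t is a perfect square
theorem odd_card_divisors_iff (t : ℕ) (ht : t ≠ 0) :
    Odd (Nat.divisors t).card ↔ IsSquare t := by
  classical
  have hsplit := Finset.filter_card_add_filter_neg_card_eq_card
    (s := Nat.divisors t) (p := fun d => d * d = t)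
  have heven : Even (((Nat.divisors t).filter (fun d => ¬ d * d = t)).card) := by
    rw [← ZMod.natCast_eq_zero_iff_even, Finset.card_eq_sum_ones, Nat.cast_sum]
    refine Finset.sum_involution (fun a _ => t / a) ?_ ?_ ?_ ?_
    · intro a ha
      decide
    · intro a ha h1
      have hm := Finset.mem_filter.mp ha
      have hdvd := (Nat.mem_divisors.mp hm.1).1
      intro hfix
      have hfix' : t / a = a := hfix
      apply hm.2
      nth_rewrite 2 [← hfix']
      exact Nat.mul_div_cancel' hdvd
    · intro a ha
      have hm := Finset.mem_filter.mp ha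
      have hdvd := (Nat.mem_divisors.mp hm.1).1
      refine Finset.mem_filter.mpr ⟨Nat.mem_divisors.mpr ⟨Nat.div_dvd_of_dvd hdvd, ht⟩, ?_⟩
      intro hq
      have hq' : (t / a) * (t / a) = t := hq
      apply hm.2
      have hapos : 0 < a := Nat.pos_of_mem_divisors hm.1
      have hdpos : 0 < t / a := Nat.div_pos (Nat.le_of_dvd (Nat.pos_of_ne_zero ht) hdvd) hapos
      have hfix : t / (t / a) = t / a := by
        nth_rewrite 1 [← hq']
        exact Nat.mul_div_cancel_left _ hdpos
      have haq : a = t / a := by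
        rw [← hfix]
        exact (Nat.div_div_self hdvd ht).symm
      rw [haq]
      exact hq'
    · intro a ha
      have hm := Finset.mem_filter.mp ha
      show t / (t / a) = a
      exact Nat.div_div_self (Nat.mem_divisors.mp hm.1).1 ht
  by_cases hsq : IsSquare t
  · obtain ⟨r, hr⟩ := hsq
    have hFr : (Nat.divisors t).filter (fun d => d * d = t) = {r} := by
      ext d
      simp only [Finset.mem_filter, Finset.mem_singleton, Nat.mem_divisors]
      constructor
      · rintro ⟨-, hd⟩
        exact Nat.mul_self_inj.mp (by rw [hd, hr])
      · rintro rfl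
        exact ⟨⟨⟨_, hr⟩, ht⟩, hr.symm⟩
    rw [hFr] at hsplit
    simp only [Finset.card_singleton] at hsplit
    constructor
    · intro _
      exact ⟨r, hr⟩
    · intro _
      rw [Nat.even_iff] at heven
      rw [Nat.odd_iff]
      omega
  · have hF0 : (Nat.divisors t).filter (fun d => d * d = t) = ∅ := by
      ext d
      simp only [Finset.mem_filter, Nat.mem_divisors, Finset.notMem_empty, iff_false, not_and]
      intro _ hd
      exact hsq ⟨d, hd.symm⟩
    rw [hF0] at hsplit
    simp only [Finset.card_empty] at hsplit
    constructor
    · intro hodd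
      rw [Nat.even_iff] at heven
      rw [Nat.odd_iff] at hodd
      omega
    · intro hsq2
      exact absurd hsq2 hsq

-- the integer-interval divisor count equals the Nat divisor count, once num covers t
theorem Dcnt_eq_card_divisors (num : Int) (t : ℕ) (ht : 1 ≤ t) (htn : (t : Int) ≤ num) :
    Dcnt 1 num (t : Int) = (Nat.divisors t).card := by
  classical
  unfold Dcnt
  have himg : (Finset.Icc (1 : ℤ) num).filter (fun d => d ∣ (t : ℤ)) =
      Finset.map ⟨(Nat.cast : ℕ → ℤ), Nat.cast_injective⟩ (Nat.divisors t) := by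
    ext d
    simp only [Finset.mem_filter, Finset.mem_Icc, Finset.mem_map,
      Function.Embedding.coeFn_mk, Nat.mem_divisors]
    constructor
    · rintro ⟨⟨h1, h2⟩, hdvd⟩
      refine ⟨d.toNat, ⟨?_, by omega⟩, by omega⟩
      have hd : d = ((d.toNat : ℤ)) := by omega
      rw [hd] at hdvd
      exact_mod_cast hdvd
    · rintro ⟨e, ⟨hdvd, -⟩, rfl⟩
      have he1 : 1 ≤ e := by
        rcases Nat.eq_zero_or_pos e with rfl | h
        · obtain rfl : t = 0 := Nat.eq_zero_of_zero_dvd hdvd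
          omega
        · exact h
      have hle : e ≤ t := Nat.le_of_dvd (by omega) hdvd
      refine ⟨⟨by exact_mod_cast he1, le_trans (by exact_mod_cast hle) htn⟩, ?_⟩
      exact_mod_cast hdvd
  rw [himg, Finset.card_map]

theorem isSquare_iff_exists (num : Int) (t : ℕ) (ht : 1 ≤ t) (htn : (t : Int) ≤ num) :
    IsSquare t ↔ ∃ j ∈ Finset.Icc (1 : Int) num, j * j = (t : Int) := by
  constructor
  · rintro ⟨r, hr⟩
    have hr1 : 1 ≤ r := by
      rcases Nat.eq_zero_or_pos r with rfl | h
      · omega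
      · exact h
    have hrt : r ≤ t := by
      calc r = r * 1 := (Nat.mul_one r).symm
      _ ≤ r * r := Nat.mul_le_mul_left r hr1
      _ = t := hr.symm
    refine ⟨(r : ℤ), Finset.mem_Icc.mpr ⟨by exact_mod_cast hr1,
      le_trans (by exact_mod_cast hrt) htn⟩, ?_⟩
    exact_mod_cast hr.symm
  · rintro ⟨j, hj, hjj⟩
    have hj' := Finset.mem_Icc.mp hj
    refine ⟨j.toNat, ?_⟩
    have hjt : ((j.toNat : ℤ)) = j := Int.toNat_of_nonneg (by omega)
    have : (t : ℤ) = ((j.toNat * j.toNat : ℕ) : ℤ) := by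
      push_cast
      rw [hjt, ← hjj]
    exact_mod_cast this

-- ===== VERDICT (by name: the statement is the Claim_ definition above) =====
theorem switch_lights_spec : Claim_equal_switch_lights := by
  unfold Claim_equal_switch_lights Spec_switch_lights
  intro num _
  unfold switch_lights switch_lights_alt
  have hla : lights_array num = List.replicate num.toNat 0 := by
    unfold lights_array
    rw [lightsLoop_eq]
    simp
  have hmaxt : (max num 0).toNat = num.toNat := by omega
  apply List.ext_getElem?
  intro i
  by_cases hi : i < num.toNat
  · have hnum1 : 1 ≤ num := by omega
    have hmax : max num 0 = num := by omega
    have h01 : ∀ v ∈ List.replicate num.toNat (0 : Int), v = 0 ∨ v = 1 := by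
      intro v hv
      left
      exact List.eq_of_mem_replicate hv
    have hA := switchLoop_getElem? num 1 (le_refl 1) (List.replicate num.toNat 0) h01 i
    have hB := markLoop_getElem? (max num 0) 1 (le_refl 1)
      (List.replicate (max num 0).toNat 0)
      (by rw [List.length_replicate]; omega) i (by omega)
    rw [hla, hA, hB, hmax]
    rw [List.getElem?_replicate_of_lt hi]
    have ht1 : 1 ≤ i + 1 := by omega
    have htn : ((i + 1 : ℕ) : ℤ) ≤ num := by push_cast; omega
    have hcast : ((i : ℤ) + 1) = ((i + 1 : ℕ) : ℤ) := by push_cast; ring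
    have hbridge : Even (Dcnt 1 num ((i : ℤ) + 1)) ↔
        ¬ ∃ j ∈ Finset.Icc (1 : ℤ) num, j * j = (i : ℤ) + 1 := by
      rw [hcast, Dcnt_eq_card_divisors num (i + 1) ht1 htn, ← Nat.not_odd_iff_even,
        odd_card_divisors_iff (i + 1) (by omega),
        isSquare_iff_exists num (i + 1) ht1 htn]
    by_cases hex : ∃ j ∈ Finset.Icc (1 : ℤ) num, j * j = (i : ℤ) + 1
    · rw [if_pos hex]
      have hne : ¬ Even (Dcnt 1 num ((i : ℤ) + 1)) := by
        rw [hbridge]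
        exact fun h => h hex
      simp [hne, tog]
    · rw [if_neg hex]
      have he : Even (Dcnt 1 num ((i : ℤ) + 1)) := hbridge.mpr hex
      simp [he]
  · have l1 : (switchLoop num 1 (lights_array num)).length = num.toNat := by
      rw [switchLoop_length, hla, List.length_replicate]
    have l2 : (markLoop (max num 0) 1 (List.replicate (max num 0).toNat 0)).length
        = num.toNat := by
      rw [markLoop_length, List.length_replicate, hmaxt]
    rw [List.getElem?_eq_none (by omega), List.getElem?_eq_none (by omega)]
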